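-- pv_equiv track=rewrite | github.com/HBinhCT/Q-project | hackerrank/Algorithms/XOR Matrix/solution.py | xorMatrix
-- ===== SOURCE A (Python) =====
-- def xorMatrix(m, first_row):
--     #
--     # Write your code here.
--     #
--     n = len(first_row)
--     m -= 1  # now 0 row is first row, 1 row is the first row to compute
--     mb = str(bin(m))[2:]
--     lmb = len(mb)
--     result = first_row.copy()
--     for i in range(lmb):
--         if mb[i] == '1':
--             tmp = result.copy()
--             offset = 2 ** (lmb - 1 - i)
--             for j in range(n):
--                 result[j] = tmp[j] ^ tmp[(j + offset) % n]
--     return result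
-- ===== SOURCE B (Python) =====
-- def xorMatrix(m, first_row):
--     # Polynomial method: the step operator is multiplication by (1 + x) in
--     # GF(2)[x]/(x^n - 1).  Compute c = (1 + x)^(m-1) by square-and-multiply
--     # (squaring doubles exponents: Frobenius), then apply c to the row once.
--     n = len(first_row)
--     if n == 0:
--         return []
--     c = [1] + [0] * (n - 1)
--     for bit in bin(m - 1)[2:]:
--         sq = [0] * n
--         for o in range(n):
--             if c[o]:
--                 sq[2 * o % n] ^= 1
--         c = sq
--         if bit == '1':
--             c = [c[o] ^ c[(o - 1) % n] for o in range(n)]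
--     res = []
--     for j in range(n):
--         acc = 0
--         for o in range(n):
--             if c[o]:
--                 acc ^= first_row[(j + o) % n]
--         res.append(acc)
--     return res
-- ===== Notes on version B (the rewrite author's own statement) =====
-- stated objective: alternative
-- what changed: B switches to the polynomial view: the step operator is multiplication by (1+x) in GF(2)[x]/(x^n-1), so B builds the coefficient vector c = (1+x)^(m-1) by square-and-multiply over the digits of bin(m-1) -- squaring is the index-doubling map c[o] -> c[2o mod n], not a row transform -- and then applies c to first_row in one convolution pass, whereas A repeatedly transforms the row itself with power-of-two offsets.
import Mathlib
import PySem

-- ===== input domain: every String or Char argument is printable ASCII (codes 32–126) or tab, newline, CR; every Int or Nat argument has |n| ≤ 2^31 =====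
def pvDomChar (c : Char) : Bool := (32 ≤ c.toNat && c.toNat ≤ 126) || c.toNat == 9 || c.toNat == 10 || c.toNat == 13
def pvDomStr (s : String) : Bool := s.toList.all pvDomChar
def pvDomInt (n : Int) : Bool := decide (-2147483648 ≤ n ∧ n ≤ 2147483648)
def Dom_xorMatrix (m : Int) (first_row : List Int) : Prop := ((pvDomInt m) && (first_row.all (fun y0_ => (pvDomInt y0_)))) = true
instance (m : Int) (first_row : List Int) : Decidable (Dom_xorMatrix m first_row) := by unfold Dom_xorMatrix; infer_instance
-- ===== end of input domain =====

-- B computes the row by the polynomial method: the step operator is multiplication by (1+x) in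
-- GF(2)[x]/(x^n - 1); B builds the coefficient vector c = (1+x)^(m-1) by square-and-multiply over the
-- digits of bin(m-1) (squaring = index doubling) and applies c to the row once, instead of A's repeated
-- row transforms with power-of-two offsets (objective: alternative).

-- ===== PORT A =====
-- str(bin(m))[2:] is ported on the char list (PySem.Int.toBinChars0b + slice: exact);
-- mb[i], result[j] and tmp[...] are always in range where the loops touch them, so pyGetD/pySetD are exact there.
def xorMatrix (m : Int) (first_row : List Int) : List Int :=
  let n : Int := PySem.List.len first_row
  let m1 : Int := m - 1                                   -- m -= 1
  let mb : List Char := PySem.List.slice (PySem.Int.toBinChars0b m1) (some 2) none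
  let lmb : Int := PySem.List.len mb
  (PySem.List.pyRange 0 lmb 1).foldl
    (fun result i =>
      if PySem.List.pyGetD mb i ' ' = '1' then
        let tmp := result
        let offset : Int := 2 ^ (lmb - 1 - i).toNat       -- 2 ** (lmb - 1 - i), exponent ≥ 0 inside the loop
        (PySem.List.pyRange 0 n 1).foldl
          (fun r j =>
            PySem.List.pySetD r j
              (PySem.Int.bxor (PySem.List.pyGetD tmp j 0)
                (PySem.List.pyGetD tmp (PySem.Int.mod (j + offset) n) 0)))
          result
      else result)
    first_row

-- ===== PORT B =====
-- c[o] (0/1 ints) is the coefficient of x^o; 'if c[o]:' is Python truthiness = c[o] != 0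
def xorMatrix_alt (m : Int) (first_row : List Int) : List Int :=
  let n : Int := PySem.List.len first_row
  if n = 0 then []
  else
    let c0 : List Int := 1 :: List.replicate (n - 1).toNat 0
    let ds : List Char := PySem.List.slice (PySem.Int.toBinChars0b (m - 1)) (some 2) none
    let c := ds.foldl
      (fun c bit =>
        let sq := (PySem.List.pyRange 0 n 1).foldl
          (fun sq o =>
            if PySem.List.pyGetD c o 0 ≠ 0 then
              PySem.List.pySetD sq (PySem.Int.mod (2 * o) n)
                (PySem.Int.bxor (PySem.List.pyGetD sq (PySem.Int.mod (2 * o) n) 0) 1)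
            else sq)
          (List.replicate n.toNat 0)
        let c := sq
        if bit = '1' then
          (PySem.List.pyRange 0 n 1).map
            (fun o => PySem.Int.bxor (PySem.List.pyGetD c o 0)
              (PySem.List.pyGetD c (PySem.Int.mod (o - 1) n) 0))
        else c)
      c0
    (PySem.List.pyRange 0 n 1).map
      (fun j =>
        (PySem.List.pyRange 0 n 1).foldl
          (fun acc o =>
            if PySem.List.pyGetD c o 0 ≠ 0 then
              PySem.Int.bxor acc (PySem.List.pyGetD first_row (PySem.Int.mod (j + o) n) 0)
            else acc)
          0)

-- ===== PRECONDITION & SPEC =====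
def Spec_xorMatrix (m : Int) (first_row : List Int) (out : List Int) : Prop := out = xorMatrix_alt m first_row
instance (m : Int) (first_row : List Int) (out : List Int) : Decidable (Spec_xorMatrix m first_row out) := by unfold Spec_xorMatrix; infer_instance

-- ===== CLAIM (what is proved, stated in full; the proofs are below) =====
def Claim_equal_xorMatrix : Prop := ∀ (m : Int) (first_row : List Int), Dom_xorMatrix m first_row → Spec_xorMatrix m first_row (xorMatrix m first_row)

-- ===== LEMMAS AND PROOFS =====

theorem pvNatXorCancel (a b c : Nat) : (a ^^^ b) ^^^ (b ^^^ c) = a ^^^ c := by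
  rw [Nat.xor_assoc, ← Nat.xor_assoc b b c, Nat.xor_self, Nat.zero_xor]

theorem pvBxor_eq_xor (a b : Int) : PySem.Int.bxor a b = Int.xor a b := by
  cases a with
  | ofNat m => cases b with
    | ofNat n => simp [PySem.Int.bxor, Int.xor]
    | negSucc n => simp [PySem.Int.bxor, Int.xor, Int.negSucc_eq]; omega
  | negSucc m => cases b with
    | ofNat n => simp [PySem.Int.bxor, Int.xor, Int.negSucc_eq]; omega
    | negSucc n => simp [PySem.Int.bxor, Int.xor, Int.negSucc_eq]; omega

-- xor cancellation on Python ints (two's complement): (x^y)^(y^z) = x^z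
theorem pvBxor_cancel (x y z : Int) :
    PySem.Int.bxor (PySem.Int.bxor x y) (PySem.Int.bxor y z) = PySem.Int.bxor x z := by
  simp only [pvBxor_eq_xor]
  cases x <;> cases y <;> cases z <;> simp [Int.xor, pvNatXorCancel]

-- one 'offset = o' pass of the matrix, as a pure function of the row
def pvStepT (o : Nat) (l : List Int) : List Int :=
  (List.range l.length).map
    (fun j => PySem.Int.bxor (l.getD j 0) (l.getD ((j + o) % l.length) 0))

-- value of a big-endian digit list, '1' counting as one ('b'/'0'/any other char as zero)
def pvBitsVal (ds : List Char) : Nat :=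
  ds.foldl (fun a c => 2 * a + (if c = '1' then 1 else 0)) 0

theorem pvStepT_length (o : Nat) (l : List Int) : (pvStepT o l).length = l.length := by
  simp [pvStepT]


theorem pvStepT_getD (o : Nat) (l : List Int) (j : Nat) (h : j < l.length) :
    (pvStepT o l).getD j 0 =
      PySem.Int.bxor (l.getD j 0) (l.getD ((j + o) % l.length) 0) := by
  rw [List.getD_eq_getElem _ _ (by simpa [pvStepT_length] using h)]
  simp [pvStepT]

-- doubling: two offset-o passes are one offset-2o pass

theorem pvStepT_stepT (o : Nat) (l : List Int) : pvStepT o (pvStepT o l) = pvStepT (o + o) l := by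
  apply List.ext_getElem (by simp [pvStepT_length])
  intro j h1 h2
  have hn : j < l.length := by simpa [pvStepT_length] using h2
  have hpos : 0 < l.length := Nat.lt_of_le_of_lt (Nat.zero_le _) hn
  have hm : (j + o) % l.length < l.length := Nat.mod_lt _ hpos
  rw [← List.getD_eq_getElem _ 0 h1, ← List.getD_eq_getElem _ 0 h2]
  rw [pvStepT_getD o (pvStepT o l) j (by simpa [pvStepT_length] using hn)]
  rw [pvStepT_length]
  rw [pvStepT_getD o l j hn, pvStepT_getD o l _ hm]
  rw [pvStepT_getD (o + o) l j hn]
  rw [Nat.mod_add_mod, ← Nat.add_assoc]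
  exact pvBxor_cancel _ _ _


theorem pvStepT_two_pow (k : Nat) (l : List Int) : pvStepT (2 ^ k) l = (pvStepT 1)^[2 ^ k] l := by
  induction k generalizing l with
  | zero => simp
  | succ k ih =>
    have h2 : 2 ^ (k + 1) = 2 ^ k + 2 ^ k := by ring
    rw [h2, ← pvStepT_stepT, ih, ih, ← Function.iterate_add_apply]

-- writing g j at every j of a full range is a map

theorem pvFoldlSet {α : Type} (g : Nat → α) :
    ∀ (n : Nat) (r : List α), n ≤ r.length →
      (List.range n).foldl (fun acc j => acc.set j (g j)) r = ((List.range n).map g) ++ r.drop n := by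
  intro n
  induction n with
  | zero => intro r _; simp
  | succ n ih =>
    intro r h
    have hn : n < r.length := h
    rw [List.range_succ, List.foldl_append, List.foldl_cons, List.foldl_nil,
        ih r (Nat.le_of_lt hn), List.map_append, List.map_singleton]
    rw [List.set_append_right _ _ (by simp)]
    simp only [List.length_map, List.length_range, Nat.sub_self]
    rw [List.drop_eq_getElem_cons hn, List.set_cons_zero]
    simp only [List.append_assoc, List.singleton_append]

-- A's inner j-loop equals one pvStepT pass (Nat level)

theorem pvInnerA (o : Nat) (r : List Int) :
    (List.range r.length).foldl
        (fun acc j => acc.set j (PySem.Int.bxor (r.getD j 0) (r.getD ((j + o) % r.length) 0))) r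
      = pvStepT o r := by
  rw [pvFoldlSet _ r.length r (Nat.le_refl _)]
  simp [pvStepT]

-- value of a big-endian '0'/'1' char list

theorem pvBitsVal_acc (ds : List Char) : ∀ a : Nat,
    ds.foldl (fun a c => 2 * a + (if c = '1' then 1 else 0)) a = a * 2 ^ ds.length + pvBitsVal ds := by
  induction ds with
  | nil => intro a; simp [pvBitsVal]
  | cons c t ih =>
    intro a
    rw [List.foldl_cons, ih]
    have h2 : pvBitsVal (c :: t) = (if c = '1' then 1 else 0) * 2 ^ t.length + pvBitsVal t := by
      rw [pvBitsVal, List.foldl_cons, ih]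
      simp
    rw [h2]
    simp only [List.length_cons, pow_succ]
    ring


theorem pvBitsVal_cons (c : Char) (t : List Char) :
    pvBitsVal (c :: t) = (if c = '1' then 2 ^ t.length else 0) + pvBitsVal t := by
  rw [pvBitsVal, List.foldl_cons, pvBitsVal_acc]
  split_ifs <;> simp


theorem pvFoldA (ds : List Char) : ∀ (r : List Int),
    (List.range ds.length).foldl
        (fun r k => if ds.getD k ' ' = '1' then pvStepT (2 ^ (ds.length - 1 - k)) r else r) r
      = (pvStepT 1)^[pvBitsVal ds] r := by
  induction ds with
  | nil => intro r; simp [pvBitsVal]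
  | cons c t ih =>
    intro r
    rw [List.length_cons, List.range_succ_eq_map, List.foldl_cons, List.foldl_map]
    have hbody :
        (List.foldl (fun r k =>
            if (c :: t).getD (k + 1) ' ' = '1' then pvStepT (2 ^ (t.length + 1 - 1 - (k + 1))) r else r)
          (if (c :: t).getD 0 ' ' = '1' then pvStepT (2 ^ (t.length + 1 - 1 - 0)) r else r)
          (List.range t.length))
        = (pvStepT 1)^[pvBitsVal t]
            (if c = '1' then pvStepT (2 ^ t.length) r else r) := by
      have : ∀ (r' : List Int),
          List.foldl (fun r k =>
              if (c :: t).getD (k + 1) ' ' = '1' then pvStepT (2 ^ (t.length + 1 - 1 - (k + 1))) r else r)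
            r' (List.range t.length)
          = (pvStepT 1)^[pvBitsVal t] r' := by
        intro r'
        have he : ∀ k : Nat, t.length + 1 - 1 - (k + 1) = t.length - 1 - k := by omega
        simp only [List.getD_cons_succ, he]
        exact ih r'
      rw [this]
      simp
    rw [hbody, pvBitsVal_cons]
    split_ifs with hc
    · rw [pvStepT_two_pow, ← Function.iterate_add_apply, Nat.add_comm]
    · simp

-- B's comprehension is exactly one pvStepT-1 pass

theorem pvFoldlInv {α β : Type} (P : α → Prop) (f g : α → β → α)
    (hfg : ∀ a b, P a → f a b = g a b) (hPg : ∀ a b, P a → P (g a b)) :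
    ∀ (xs : List β) (a : α), P a → xs.foldl f a = xs.foldl g a := by
  intro xs
  induction xs with
  | nil => intro a _; rfl
  | cons x t ih =>
    intro a ha
    rw [List.foldl_cons, List.foldl_cons, hfg a x ha]
    exact ih _ (hPg a x ha)

-- A's inner loop, Int level → pvStepT (given the length invariant)

theorem pvInnerA_int (n0 e : Nat) (tmp : List Int) (h : tmp.length = n0) :
    (PySem.List.pyRange 0 (n0 : Int) 1).foldl
        (fun r j =>
          PySem.List.pySetD r j
            (PySem.Int.bxor (PySem.List.pyGetD tmp j 0)
              (PySem.List.pyGetD tmp (PySem.Int.mod (j + (2 : Int) ^ e) (n0 : Int)) 0)))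
        tmp
      = pvStepT (2 ^ e) tmp := by
  subst h
  rw [PySem.List.pyRange_one, List.foldl_map]
  have hconv : ∀ (r : List Int) (j : Nat),
      (fun (r : List Int) (j : Nat) =>
        PySem.List.pySetD r ((0 : Int) + (j : Int))
          (PySem.Int.bxor (PySem.List.pyGetD tmp ((0 : Int) + (j : Int)) 0)
            (PySem.List.pyGetD tmp
              (PySem.Int.mod (((0 : Int) + (j : Int)) + (2 : Int) ^ e) ((tmp.length : Nat) : Int)) 0))) r j
      = r.set j (PySem.Int.bxor (tmp.getD j 0) (tmp.getD ((j + 2 ^ e) % tmp.length) 0)) := by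
    intro r j
    have h3 : PySem.Int.mod ((j : Int) + (2 : Int) ^ e) ((tmp.length : Nat) : Int)
        = (((j + 2 ^ e) % tmp.length : Nat) : Int) := by
      rw [show ((j : Int) + (2 : Int) ^ e) = (((j + 2 ^ e : Nat)) : Int) by push_cast; ring]
      exact PySem.Int.mod_natCast _ _
    simp only [zero_add, h3, PySem.List.pySetD_natCast, PySem.List.pyGetD_natCast]
  simp only [hconv]
  have hrange : ((tmp.length : Int) - 0).toNat = tmp.length := by omega
  rw [hrange, pvInnerA (2 ^ e) tmp]

-- port A computes the same iterate of pvStepT 1 (for m ≥ 1)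

-- port A computes the iterate of pvStepT 1 given by the digit string of bin(m-1) (every m)
theorem pvPortA (m : Int) (row : List Int) :
    xorMatrix m row
      = (pvStepT 1)^[pvBitsVal (PySem.List.slice (PySem.Int.toBinChars0b (m - 1)) (some 2) none)] row := by
  unfold xorMatrix
  simp only [PySem.List.len_eq]
  generalize PySem.List.slice (PySem.Int.toBinChars0b (m - 1)) (some 2) none = ds
  rw [PySem.List.pyRange_one 0 ((ds.length : Nat) : Int), List.foldl_map]
  have hrange : (((ds.length : Nat) : Int) - 0).toNat = ds.length := by omega
  rw [hrange]
  have key := pvFoldlInv (fun r : List Int => r.length = row.length)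
    (fun (result : List Int) (k : Nat) =>
      if PySem.List.pyGetD ds ((0 : Int) + (k : Int)) ' ' = '1' then
        (PySem.List.pyRange 0 ((row.length : Nat) : Int) 1).foldl
          (fun r j =>
            PySem.List.pySetD r j
              (PySem.Int.bxor (PySem.List.pyGetD result j 0)
                (PySem.List.pyGetD result
                  (PySem.Int.mod (j + 2 ^ ((((ds.length : Nat) : Int) - 1 - ((0 : Int) + (k : Int))).toNat)) ((row.length : Nat) : Int)) 0)))
          result
      else result)
    (fun (r : List Int) (k : Nat) =>
      if ds.getD k ' ' = '1' then
        pvStepT (2 ^ (ds.length - 1 - k)) r else r)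
    ?_ ?_ (List.range ds.length) row rfl
  · rw [key, pvFoldA]
  · intro a k ha
    have hcond : PySem.List.pyGetD ds ((0 : Int) + (k : Int)) ' ' = ds.getD k ' ' := by
      simp [List.getD]
    have hexp : ((((ds.length : Nat) : Int) - 1 - ((0 : Int) + (k : Int))).toNat)
        = ds.length - 1 - k := by omega
    beta_reduce
    rw [hcond, hexp]
    split_ifs with hc
    · exact pvInnerA_int row.length _ a ha
    · rfl
  · intro a k ha
    beta_reduce
    split_ifs with hc
    · rw [pvStepT_length]; exact ha
    · exact ha

theorem pvBx_comm (a b : Int) : PySem.Int.bxor a b = PySem.Int.bxor b a := by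
  simp only [pvBxor_eq_xor]; cases a <;> cases b <;> simp [Int.xor, Nat.xor_comm]

theorem pvBx_assoc (a b c : Int) :
    PySem.Int.bxor (PySem.Int.bxor a b) c = PySem.Int.bxor a (PySem.Int.bxor b c) := by
  simp only [pvBxor_eq_xor]; cases a <;> cases b <;> cases c <;> simp [Int.xor, Nat.xor_assoc]

theorem pvBx_self (a : Int) : PySem.Int.bxor a a = 0 := by
  simp only [pvBxor_eq_xor]; cases a <;> simp [Int.xor]

theorem pvBx_zero (a : Int) : PySem.Int.bxor a 0 = a := by
  simp only [pvBxor_eq_xor]; cases a <;> simp [Int.xor]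

theorem pvBx_zero_left (a : Int) : PySem.Int.bxor 0 a = a := by
  simp only [pvBxor_eq_xor]; cases a <;> simp [Int.xor]

theorem pvBx_left_comm (a b c : Int) :
    PySem.Int.bxor a (PySem.Int.bxor b c) = PySem.Int.bxor b (PySem.Int.bxor a c) := by
  rw [← pvBx_assoc, pvBx_comm a b, pvBx_assoc]

-- XOR-sum of a list
def pvX (l : List Int) : Int := l.foldr PySem.Int.bxor 0

theorem pvX_nil : pvX [] = 0 := rfl
theorem pvX_cons (a : Int) (l : List Int) : pvX (a :: l) = PySem.Int.bxor a (pvX l) := rfl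

theorem pvX_append (l1 l2 : List Int) : pvX (l1 ++ l2) = PySem.Int.bxor (pvX l1) (pvX l2) := by
  induction l1 with
  | nil => simp [pvX_nil, pvX_cons, pvBx_zero_left]
  | cons a t ih => simp only [List.cons_append, pvX_cons, ih, pvBx_assoc]

theorem pvX_zero_fun {α : Type} (l : List α) : pvX (l.map (fun _ => (0 : Int))) = 0 := by
  induction l with
  | nil => rfl
  | cons a t ih => simp only [List.map_cons, pvX_cons, ih, pvBx_zero]

-- splitting a pointwise xor
theorem pvX_split {α : Type} (l : List α) (g h : α → Int) :
    pvX (l.map (fun o => PySem.Int.bxor (g o) (h o)))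
      = PySem.Int.bxor (pvX (l.map g)) (pvX (l.map h)) := by
  induction l with
  | nil => simp [pvX_nil, pvBx_zero]
  | cons a t ih =>
    simp only [List.map_cons, pvX_cons, ih]
    rw [pvBx_assoc, pvBx_assoc, pvBx_left_comm (h a)]

-- dropping an if into a filter
theorem pvX_ite_filter {α : Type} (l : List α) (P : α → Prop) [DecidablePred P] (g : α → Int) :
    pvX (l.map (fun o => if P o then g o else 0))
      = pvX ((l.filter (fun o => decide (P o))).map g) := by
  induction l with
  | nil => rfl
  | cons a t ih =>
    by_cases h : P a
    · rw [List.filter_cons_of_pos (by simpa using h)]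
      simp only [List.map_cons, pvX_cons, if_pos h, ih]
    · rw [List.filter_cons_of_neg (by simpa using h)]
      simp only [List.map_cons, pvX_cons, if_neg h, ih, pvBx_zero_left]

-- THE CRUX: the double XOR-sum of a symmetric-index function collapses to the diagonal
theorem pvSqCore (f : Nat → Int) :
    ∀ (S : List Nat),
      pvX (S.map (fun o => pvX (S.map (fun p => f (o + p)))))
        = pvX (S.map (fun o => f (o + o))) := by
  intro S
  induction S with
  | nil => rfl
  | cons a t ih =>
    simp only [List.map_cons, pvX_cons]
    have hrow : ∀ o : Nat,
        pvX (f (o + a) :: t.map (fun p => f (o + p)))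
          = PySem.Int.bxor (f (o + a)) (pvX (t.map (fun p => f (o + p)))) := fun o => rfl
    rw [pvX_split t (fun o => f (o + a)) (fun o => pvX (t.map (fun p => f (o + p)))), ih]
    have hswap : pvX (t.map (fun o => f (o + a))) = pvX (t.map (fun p => f (a + p))) := by
      congr 1
      exact List.map_congr_left (fun o _ => by rw [Nat.add_comm])
    rw [hswap]
    generalize pvX (t.map (fun p => f (a + p))) = u
    generalize pvX (t.map (fun o => f (o + o))) = w
    rw [pvBx_assoc, ← pvBx_assoc u u w, pvBx_self, pvBx_zero_left]

theorem pvBx_right_swap (a b c : Int) :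
    PySem.Int.bxor (PySem.Int.bxor a b) c = PySem.Int.bxor (PySem.Int.bxor a c) b := by
  rw [pvBx_assoc, pvBx_comm b c, ← pvBx_assoc]

theorem pvX_flip (f g : Nat → Int) (q : Nat) (h : ∀ o, o ≠ q → f o = g o) :
    ∀ n : Nat, q < n →
      pvX ((List.range n).map f)
        = PySem.Int.bxor (pvX ((List.range n).map g)) (PySem.Int.bxor (f q) (g q)) := by
  intro n
  induction n with
  | zero => intro h0; omega
  | succ k ih =>
    intro hq
    rw [List.range_succ, List.map_append, List.map_append, pvX_append, pvX_append]
    by_cases hk : q = k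
    · subst hk
      have hpref : (List.range q).map f = (List.range q).map g :=
        List.map_congr_left (fun o ho => h o (by have := List.mem_range.mp ho; omega))
      rw [hpref]
      simp only [List.map_singleton, pvX_cons, pvX_nil, pvBx_zero]
      generalize pvX ((List.range q).map g) = u
      rw [pvBx_assoc, pvBx_left_comm (g q), pvBx_self, pvBx_zero]
    · have hlt : q < k := by omega
      rw [ih hlt]
      simp only [List.map_singleton, pvX_cons, pvX_nil, pvBx_zero]
      rw [h k (by omega)]
      exact pvBx_right_swap _ _ _

theorem pvRotSplit (n d : Nat) (hd : d ≤ n) (f : Nat → Int) :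
    (List.range n).map (fun o => f ((o + d) % n))
      = (List.range (n - d)).map (fun o => f (o + d)) ++ (List.range d).map f := by
  apply List.ext_getElem
  · simp; omega
  · intro i h1 h2
    have hi : i < n := by simpa using h1
    simp only [List.getElem_map, List.getElem_range]
    by_cases hc : i < n - d
    · rw [List.getElem_append_left (by simpa using hc)]
      simp only [List.getElem_map, List.getElem_range]
      congr 1
      rw [Nat.mod_eq_of_lt (by omega)]
    · rw [List.getElem_append_right (by simpa using hc)]
      simp only [List.getElem_map, List.getElem_range, List.length_map, List.length_range]
      congr 1
      have hn : 0 < n := by omega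
      have : i + d = n + (i - (n - d)) := by omega
      rw [this, Nat.add_mod_left, Nat.mod_eq_of_lt (by omega)]

theorem pvX_rot (n d : Nat) (hd : d ≤ n) (f : Nat → Int) :
    pvX ((List.range n).map (fun o => f ((o + d) % n))) = pvX ((List.range n).map f) := by
  rw [pvRotSplit n d hd f, pvX_append, pvBx_comm, ← pvX_append]
  congr 1
  have h1 : (List.range (n - d)).map (fun o => f (o + d)) = (List.range' d (n - d)).map f := by
    rw [List.range'_eq_map_range]
    rw [List.map_map]
    exact List.map_congr_left (fun o _ => by simp [Nat.add_comm])
  rw [h1, ← List.map_append]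
  congr 1
  rw [List.range_eq_range', List.range_eq_range',
      show List.range' 0 d = List.range' 0 d 1 from rfl,
      show List.range' d (n - d) = List.range' (0 + 1 * d) (n - d) 1 by norm_num,
      List.range'_append, show d + (n - d) = n by omega]

-- ===== semantics of a 0/1 coefficient vector =====
def pvSem (n : Nat) (c w : List Int) (j : Nat) : Int :=
  pvX ((List.range n).map (fun o => if c.getD o 0 ≠ 0 then w.getD ((j + o) % n) 0 else 0))

def pvSemRow (n : Nat) (c w : List Int) : List Int := (List.range n).map (pvSem n c w)

def pvBin (c : List Int) : Prop := ∀ o : Nat, c.getD o 0 = 0 ∨ c.getD o 0 = 1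

theorem pvSemRow_length (n : Nat) (c w : List Int) : (pvSemRow n c w).length = n := by
  simp [pvSemRow]

theorem pvSemRow_getD (n : Nat) (c w : List Int) (j : Nat) (hj : j < n) :
    (pvSemRow n c w).getD j 0 = pvSem n c w j := by
  rw [List.getD_eq_getElem _ _ (by simpa [pvSemRow_length] using hj)]
  simp [pvSemRow]

theorem pvSem_mod (n : Nat) (c w : List Int) (j : Nat) :
    pvSem n c w (j % n) = pvSem n c w j := by
  unfold pvSem
  congr 1
  apply List.map_congr_left
  intro o _
  rw [Nat.mod_add_mod]

theorem pvSem_zeros (n k : Nat) (w : List Int) (j : Nat) :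
    pvSem n (List.replicate k 0) w j = 0 := by
  unfold pvSem
  have h : ∀ o : Nat, (List.replicate k (0 : Int)).getD o 0 = 0 := by
    intro o
    rcases Nat.lt_or_ge o k with h | h
    · rw [List.getD_eq_getElem _ _ (by simpa using h)]; simp
    · rw [List.getD_eq_default _ _ (by simpa using h)]
  simp only [h, ne_eq, not_true_eq_false, ite_false]
  exact pvX_zero_fun _
 
theorem pvGetD_set_ne (c : List Int) (q o : Nat) (x : Int) (ho : o ≠ q) :
    (c.set q x).getD o 0 = c.getD o 0 := by
  rcases Nat.lt_or_ge o c.length with h1 | h1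
  · rw [List.getD_eq_getElem _ _ (by simpa using h1), List.getD_eq_getElem _ _ h1,
       List.getElem_set_ne (by omega)]
  · rw [List.getD_eq_default _ _ (by simpa using h1), List.getD_eq_default _ _ (by simpa using h1)]

theorem pvGetD_set_self (c : List Int) (q : Nat) (x : Int) (hq : q < c.length) :
    (c.set q x).getD q 0 = x := by
  rw [List.getD_eq_getElem _ _ (by simpa using hq), List.getElem_set_self (by simpa using hq)]

theorem pvBin_set (c : List Int) (q : Nat) (hb : pvBin c) :
    pvBin (c.set q (PySem.Int.bxor (c.getD q 0) 1)) := by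
  intro o
  by_cases he : o = q
  · subst he
    rcases Nat.lt_or_ge o c.length with ho | ho
    · rw [pvGetD_set_self c o _ ho]
      rcases hb o with h | h <;> rw [h] <;> [right; left] <;> decide
    · rw [List.getD_eq_default _ _ (by simpa using ho)]
      left; rfl
  · rw [pvGetD_set_ne c q o _ he]
    exact hb o

theorem pvSem_flip (n : Nat) (c w : List Int) (j q : Nat) (hq : q < n) (hqc : q < c.length)
    (hb : pvBin c) :
    pvSem n (c.set q (PySem.Int.bxor (c.getD q 0) 1)) w j
      = PySem.Int.bxor (pvSem n c w j) (w.getD ((j + q) % n) 0) := by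
  unfold pvSem
  rw [pvX_flip
      (fun o => if (c.set q (PySem.Int.bxor (c.getD q 0) 1)).getD o 0 ≠ 0 then w.getD ((j + o) % n) 0 else 0)
      (fun o => if c.getD o 0 ≠ 0 then w.getD ((j + o) % n) 0 else 0) q ?_ n hq]
  · congr 1
    have hs := pvGetD_set_self c q (PySem.Int.bxor (c.getD q 0) 1) hqc
    beta_reduce
    rcases hb q with h | h
    · rw [hs, h, (by decide : PySem.Int.bxor (0:Int) 1 = 1)]
      norm_num
    · rw [hs, h, (by decide : PySem.Int.bxor (1:Int) 1 = 0)]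
      norm_num
      exact pvBx_zero_left _
  · intro o ho
    simp only [pvGetD_set_ne c q o _ ho]

-- accumulator fold = XOR-sum
theorem pvFoldAcc (P : Nat → Prop) [DecidablePred P] (t : Nat → Int) :
    ∀ (L : List Nat) (acc : Int),
      L.foldl (fun acc o => if P o then PySem.Int.bxor acc (t o) else acc) acc
        = PySem.Int.bxor acc (pvX (L.map (fun o => if P o then t o else 0))) := by
  intro L
  induction L with
  | nil => intro acc; simp [pvX_nil, pvBx_zero]
  | cons a l ih =>
    intro acc
    rw [List.foldl_cons, ih]
    by_cases h : P a
    · rw [if_pos h]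
      simp only [List.map_cons, pvX_cons, if_pos h, pvBx_assoc]
    · rw [if_neg h]
      simp only [List.map_cons, pvX_cons, if_neg h, pvBx_zero_left]

-- the square loop: flipping position (2*o)%n for each o in L with P o
theorem pvSqFold (n : Nat) (hn : 0 < n) (P : Nat → Prop) [DecidablePred P] :
    ∀ (L : List Nat) (v : List Int), v.length = n → pvBin v →
      (L.foldl (fun sq o => if P o then
          sq.set ((2*o) % n) (PySem.Int.bxor (sq.getD ((2*o) % n) 0) 1) else sq) v).length = n
      ∧ pvBin (L.foldl (fun sq o => if P o then
          sq.set ((2*o) % n) (PySem.Int.bxor (sq.getD ((2*o) % n) 0) 1) else sq) v)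
      ∧ ∀ (w : List Int) (j : Nat),
          pvSem n (L.foldl (fun sq o => if P o then
              sq.set ((2*o) % n) (PySem.Int.bxor (sq.getD ((2*o) % n) 0) 1) else sq) v) w j
            = PySem.Int.bxor (pvSem n v w j)
                (pvX ((L.filter (fun o => decide (P o))).map (fun o => w.getD ((j + 2*o) % n) 0))) := by
  intro L
  induction L with
  | nil =>
    intro v hlen hb
    exact ⟨hlen, hb, fun w j => by simp [pvX_nil, pvBx_zero]⟩
  | cons a l ih =>
    intro v hlen hb
    by_cases h : P a
    · have hq : (2*a) % n < n := Nat.mod_lt _ hn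
      have hset := pvBin_set v ((2*a) % n) hb
      have hlen' : (v.set ((2*a) % n) (PySem.Int.bxor (v.getD ((2*a) % n) 0) 1)).length = n := by
        simpa using hlen
      obtain ⟨l1, l2, l3⟩ := ih _ hlen' hset
      refine ⟨by simpa [h] using l1, by simpa [h] using l2, fun w j => ?_⟩
      rw [List.foldl_cons, if_pos h]
      rw [l3 w j, pvSem_flip n v w j ((2*a) % n) hq (by omega) hb]
      rw [List.filter_cons_of_pos (by simpa using h), List.map_cons, pvX_cons]
      rw [pvBx_assoc]
      congr 2
      rw [Nat.add_comm j ((2*a) % n), Nat.mod_add_mod, Nat.add_comm]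
    · rw [List.foldl_cons, if_neg h, List.filter_cons_of_neg (by simpa using h)]
      exact ih v hlen hb

-- if-through-xor for 0/1 entries
theorem pvIteBx (a b v : Int) (ha : a = 0 ∨ a = 1) (hb : b = 0 ∨ b = 1) :
    (if PySem.Int.bxor a b ≠ 0 then v else 0)
      = PySem.Int.bxor (if a ≠ 0 then v else 0) (if b ≠ 0 then v else 0) := by
  rcases ha with h | h <;> rcases hb with h2 | h2 <;> subst h <;> subst h2
  · rw [(by decide : PySem.Int.bxor (0:Int) 0 = 0)]; norm_num
  · rw [(by decide : PySem.Int.bxor (0:Int) 1 = 1)]; norm_num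
    exact (pvBx_zero_left v).symm
  · rw [(by decide : PySem.Int.bxor (1:Int) 0 = 1)]; norm_num
  · rw [(by decide : PySem.Int.bxor (1:Int) 1 = 0)]; norm_num

theorem pvAddModMod (a b n : Nat) : (a + b % n) % n = (a + b) % n := by
  rw [Nat.add_comm a (b % n), Nat.mod_add_mod, Nat.add_comm]

-- multiply by (1 + x): the comprehension [c[o] ^ c[(o-1)%n] for o in range(n)]
theorem pvMulGetD (n : Nat) (c : List Int) (o : Nat) (ho : o < n) :
    ((List.range n).map (fun o => PySem.Int.bxor (c.getD o 0) (c.getD ((o + (n-1)) % n) 0))).getD o 0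
      = PySem.Int.bxor (c.getD o 0) (c.getD ((o + (n-1)) % n) 0) := by
  rw [List.getD_eq_getElem _ _ (by simpa using ho)]
  simp

theorem pvBxBin (a b : Int) (ha : a = 0 ∨ a = 1) (hb : b = 0 ∨ b = 1) :
    PySem.Int.bxor a b = 0 ∨ PySem.Int.bxor a b = 1 := by
  rcases ha with h | h <;> rcases hb with h2 | h2 <;> subst h <;> subst h2 <;> [left; right; right; left] <;> decide

theorem pvMulBin (n : Nat) (c : List Int) (hb : pvBin c) :
    pvBin ((List.range n).map (fun o => PySem.Int.bxor (c.getD o 0) (c.getD ((o + (n-1)) % n) 0))) := by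
  intro o
  rcases Nat.lt_or_ge o n with ho | ho
  · rw [pvMulGetD n c o ho]
    exact pvBxBin _ _ (hb o) (hb _)
  · rw [List.getD_eq_default _ _ (by simpa using ho)]
    left; rfl

theorem pvMulSem (n : Nat) (hn : 0 < n) (c w : List Int) (hb : pvBin c) (j : Nat) :
    pvSem n ((List.range n).map (fun o => PySem.Int.bxor (c.getD o 0) (c.getD ((o + (n-1)) % n) 0))) w j
      = PySem.Int.bxor (pvSem n c w j) (pvSem n c w ((j + 1) % n)) := by
  conv_lhs => unfold pvSem
  have hcong : ((List.range n).map (fun o =>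
      if ((List.range n).map (fun o => PySem.Int.bxor (c.getD o 0) (c.getD ((o + (n-1)) % n) 0))).getD o 0 ≠ 0
      then w.getD ((j + o) % n) 0 else 0))
      = (List.range n).map (fun o =>
        PySem.Int.bxor (if c.getD o 0 ≠ 0 then w.getD ((j + o) % n) 0 else 0)
          (if c.getD ((o + (n-1)) % n) 0 ≠ 0 then w.getD ((j + o) % n) 0 else 0)) := by
    apply List.map_congr_left
    intro o ho
    rw [pvMulGetD n c o (List.mem_range.mp ho)]
    exact pvIteBx _ _ _ (hb o) (hb _)
  rw [hcong, pvX_split]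
  congr 1
  -- the shifted part: reindex o ↦ (o + (n-1)) % n
  have hrot := pvX_rot n (n-1) (by omega)
    (fun t => if c.getD (t % n) 0 ≠ 0 then w.getD ((j + 1 + t) % n) 0 else 0)
  have hleft : ((List.range n).map (fun o =>
      if c.getD (((o + (n-1)) % n) % n) 0 ≠ 0 then w.getD ((j + 1 + (o + (n-1)) % n) % n) 0 else 0))
      = (List.range n).map (fun o =>
        if c.getD ((o + (n-1)) % n) 0 ≠ 0 then w.getD ((j + o) % n) 0 else 0) := by
    apply List.map_congr_left
    intro o ho
    have h1 : ((o + (n-1)) % n) % n = (o + (n-1)) % n := Nat.mod_mod_of_dvd _ dvd_rfl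
    have h2 : (j + 1 + (o + (n-1)) % n) % n = (j + o) % n := by
      rw [pvAddModMod]
      rw [show j + 1 + (o + (n-1)) = j + o + n by omega]
      exact Nat.add_mod_right _ _
    rw [h1, h2]
  have hright : ((List.range n).map (fun t =>
      if c.getD (t % n) 0 ≠ 0 then w.getD ((j + 1 + t) % n) 0 else 0))
      = (List.range n).map (fun o =>
        if c.getD o 0 ≠ 0 then w.getD (((j + 1) % n + o) % n) 0 else 0) := by
    apply List.map_congr_left
    intro o ho
    rw [Nat.mod_eq_of_lt (List.mem_range.mp ho), Nat.mod_add_mod]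
  rw [← hleft, hrot, hright]
  rfl

-- pvStepT from the A side (copy for scratch)
theorem pvIter_length' (k : Nat) (l : List Int) : ((pvStepT 1)^[k] l).length = l.length := by
  induction k generalizing l with
  | zero => rfl
  | succ k ih => rw [Function.iterate_succ_apply, ih]; simp [pvStepT]

-- Nat-level helpers mirroring B's loop bodies
def pvSqStep (n : Nat) (c : List Int) : List Int :=
  (List.range n).foldl
    (fun sq o => if c.getD o 0 ≠ 0 then
        sq.set ((2*o) % n) (PySem.Int.bxor (sq.getD ((2*o) % n) 0) 1) else sq)
    (List.replicate n 0)

def pvMulStep (n : Nat) (c : List Int) : List Int :=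
  (List.range n).map (fun o => PySem.Int.bxor (c.getD o 0) (c.getD ((o + (n-1)) % n) 0))

def pvBody (n : Nat) (c : List Int) (bit : Char) : List Int :=
  if bit = '1' then pvMulStep n (pvSqStep n c) else pvSqStep n c

theorem pvReplicate_getD (k o : Nat) : (List.replicate k (0 : Int)).getD o 0 = 0 := by
  rcases Nat.lt_or_ge o k with h | h
  · rw [List.getD_eq_getElem _ _ (by simpa using h)]; simp
  · rw [List.getD_eq_default _ _ (by simpa using h)]

theorem pvReplicate_bin (k : Nat) : pvBin (List.replicate k 0) := by
  intro o; rw [pvReplicate_getD]; left; rfl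

theorem pvSqStep_length (n : Nat) (hn : 0 < n) (c : List Int) : (pvSqStep n c).length = n :=
  (pvSqFold n hn (fun o => c.getD o 0 ≠ 0) (List.range n) (List.replicate n 0)
    (by simp) (pvReplicate_bin n)).1

theorem pvSqStep_bin (n : Nat) (hn : 0 < n) (c : List Int) : pvBin (pvSqStep n c) :=
  (pvSqFold n hn (fun o => c.getD o 0 ≠ 0) (List.range n) (List.replicate n 0)
    (by simp) (pvReplicate_bin n)).2.1

-- the square loop computes c ∘ c (as an operator)
theorem pvSqStep_sem (n : Nat) (hn : 0 < n) (c w : List Int) (j : Nat) :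
    pvSem n (pvSqStep n c) w j = pvSem n c (pvSemRow n c w) j := by
  have h := (pvSqFold n hn (fun o => c.getD o 0 ≠ 0) (List.range n) (List.replicate n 0)
    (by simp) (pvReplicate_bin n)).2.2 w j
  rw [pvSqStep, h, pvSem_zeros, pvBx_zero_left]
  -- RHS: expand the composition into the double sum and collapse with pvSqCore
  conv_rhs => unfold pvSem
  have hcong : ((List.range n).map (fun o =>
      if c.getD o 0 ≠ 0 then (pvSemRow n c w).getD ((j + o) % n) 0 else 0))
      = (List.range n).map (fun o =>
        if c.getD o 0 ≠ 0 then
          pvX (((List.range n).filter (fun p => decide (c.getD p 0 ≠ 0))).map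
            (fun p => w.getD ((j + (o + p)) % n) 0)) else 0) := by
    apply List.map_congr_left
    intro o ho
    congr 1
    rw [pvSemRow_getD n c w _ (Nat.mod_lt _ hn), pvSem_mod]
    unfold pvSem
    rw [pvX_ite_filter]
    congr 1
    apply List.map_congr_left
    intro p hp
    rw [Nat.add_assoc]
  rw [hcong, pvX_ite_filter]
  rw [pvSqCore (fun s => w.getD ((j + s) % n) 0)]
  rw [← pvX_ite_filter (List.range n) (fun o => c.getD o 0 ≠ 0)
      (fun o => w.getD ((j + (o + o)) % n) 0)]
  rw [pvX_ite_filter]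
  congr 1
  apply List.map_congr_left
  intro o ho
  rw [Nat.two_mul]

-- the basis vector e0 = [1] ++ zeros
theorem pvE0_length (n : Nat) (hn : 0 < n) : ((1 : Int) :: List.replicate (n-1) 0).length = n := by
  simp; omega

theorem pvE0_getD (n o : Nat) : ((1 : Int) :: List.replicate (n-1) 0).getD o 0
    = if o = 0 then 1 else 0 := by
  cases o with
  | zero => rfl
  | succ k => rw [if_neg (by omega)]; simpa using pvReplicate_getD (n-1) k

theorem pvE0_bin (n : Nat) : pvBin ((1 : Int) :: List.replicate (n-1) 0) := by
  intro o; rw [pvE0_getD]; split_ifs <;> [right; left] <;> rfl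

theorem pvE0_sem (n : Nat) (hn : 0 < n) (w : List Int) (j : Nat) :
    pvSem n ((1 : Int) :: List.replicate (n-1) 0) w j = w.getD (j % n) 0 := by
  unfold pvSem
  rw [pvX_flip _ (fun _ => (0 : Int)) 0 ?_ n hn]
  · rw [pvX_zero_fun, pvBx_zero_left, pvE0_getD]
    norm_num
  · intro o ho
    rw [pvE0_getD, if_neg ho]
    norm_num

theorem pvE0_semRow (n : Nat) (hn : 0 < n) (w : List Int) (hw : w.length = n) :
    pvSemRow n ((1 : Int) :: List.replicate (n-1) 0) w = w := by
  apply List.ext_getElem (by simp [pvSemRow_length, hw])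
  intro j h1 h2
  rw [← List.getD_eq_getElem _ 0 h1, ← List.getD_eq_getElem _ 0 h2]
  have hj : j < n := by simpa [pvSemRow_length] using h1
  rw [pvSemRow_getD n _ w j hj, pvE0_sem n hn w j, Nat.mod_eq_of_lt (by omega)]

theorem pvStepT_of_len (n : Nat) (v : List Int) (hv : v.length = n) :
    pvStepT 1 v = (List.range n).map
      (fun j => PySem.Int.bxor (v.getD j 0) (v.getD ((j + 1) % n) 0)) := by
  simp only [pvStepT, hv]

theorem pvSemRow_of_sem (n : Nat) (c w : List Int) (j : Nat) (hj : j < n) :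
    pvSem n c w j = (pvSemRow n c w).getD j 0 := (pvSemRow_getD n c w j hj).symm

theorem pvDigitFold (n : Nat) (hn : 0 < n) :
    ∀ (ds : List Char) (c : List Int) (v : Nat),
      c.length = n → pvBin c →
      (∀ w : List Int, w.length = n → pvSemRow n c w = (pvStepT 1)^[v] w) →
      (ds.foldl (pvBody n) c).length = n ∧ pvBin (ds.foldl (pvBody n) c) ∧
      ∀ w : List Int, w.length = n →
        pvSemRow n (ds.foldl (pvBody n) c) w
          = (pvStepT 1)^[ds.foldl (fun a ch => 2*a + (if ch = '1' then 1 else 0)) v] w := by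
  intro ds
  induction ds with
  | nil => intro c v h1 h2 h3; exact ⟨h1, h2, h3⟩
  | cons bit t ih =>
    intro c v h1 h2 h3
    rw [List.foldl_cons, List.foldl_cons]
    -- the squared vector
    have hsq_len := pvSqStep_length n hn c
    have hsq_bin := pvSqStep_bin n hn c
    have hsq_sem : ∀ w : List Int, w.length = n →
        pvSemRow n (pvSqStep n c) w = (pvStepT 1)^[2*v] w := by
      intro w hw
      have : pvSemRow n (pvSqStep n c) w = pvSemRow n c (pvSemRow n c w) := by
        unfold pvSemRow
        exact List.map_congr_left (fun j _ => pvSqStep_sem n hn c w j)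
      rw [this, h3 w hw, h3 _ (by rw [pvIter_length', hw]), ← Function.iterate_add_apply]
      congr 1
      omega
    by_cases hb : bit = '1'
    · -- multiply by (1 + x) on top of the square
      have hm_len : (pvMulStep n (pvSqStep n c)).length = n := by simp [pvMulStep]
      have hm_bin : pvBin (pvMulStep n (pvSqStep n c)) := pvMulBin n _ hsq_bin
      have hm_sem : ∀ w : List Int, w.length = n →
          pvSemRow n (pvMulStep n (pvSqStep n c)) w = (pvStepT 1)^[2*v + 1] w := by
        intro w hw
        have hu := hsq_sem w hw
        have hulen : ((pvStepT 1)^[2*v] w).length = n := by rw [pvIter_length', hw]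
        have : pvSemRow n (pvMulStep n (pvSqStep n c)) w
            = pvStepT 1 ((pvStepT 1)^[2*v] w) := by
          rw [pvStepT_of_len n _ hulen]
          unfold pvSemRow
          apply List.map_congr_left
          intro j hj
          have hjn : j < n := List.mem_range.mp hj
          rw [show pvMulStep n (pvSqStep n c) = (List.range n).map
              (fun o => PySem.Int.bxor ((pvSqStep n c).getD o 0)
                ((pvSqStep n c).getD ((o + (n-1)) % n) 0)) from rfl]
          rw [pvMulSem n hn _ w hsq_bin j]
          rw [pvSemRow_of_sem n _ w j hjn, pvSemRow_of_sem n _ w _ (Nat.mod_lt _ hn), hu]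
        rw [this]
        exact (Function.iterate_succ_apply' _ _ _).symm
      simp only [pvBody, if_pos hb]
      have := ih (pvMulStep n (pvSqStep n c)) (2*v + 1) hm_len hm_bin hm_sem
      simpa [hb] using this
    · simp only [pvBody, if_neg hb]
      have := ih (pvSqStep n c) (2*v) hsq_len hsq_bin hsq_sem
      simpa [hb] using this

theorem pvModSub1 (len o : Nat) (hlen : 0 < len) (ho : o < len) :
    PySem.Int.mod ((o : Int) - 1) (len : Int) = (((o + (len-1)) % len : Nat) : Int) := by
  rw [PySem.Int.mod_eq_emod_of_pos (by exact_mod_cast hlen)]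
  rw [Int.natCast_mod]
  have h1 : ((o + (len-1) : Nat) : Int) = ((o : Int) - 1) + (len : Int) * 1 := by
    push_cast [Nat.cast_sub (by omega : 1 ≤ len)]
    ring
  rw [h1, Int.add_mul_emod_self_left]

theorem pvSqPortEq (len : Nat) (hlen : 0 < len) (c : List Int) :
    (PySem.List.pyRange 0 (len : Int) 1).foldl
        (fun sq o =>
          if PySem.List.pyGetD c o 0 ≠ 0 then
            PySem.List.pySetD sq (PySem.Int.mod (2 * o) (len : Int))
              (PySem.Int.bxor (PySem.List.pyGetD sq (PySem.Int.mod (2 * o) (len : Int)) 0) 1)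
          else sq)
        (List.replicate ((len : Int)).toNat 0)
      = pvSqStep len c := by
  rw [PySem.List.pyRange_one, List.foldl_map]
  rw [show (((len : Nat) : Int) - 0).toNat = len by omega, Int.toNat_natCast]
  unfold pvSqStep
  congr 1
  funext sq o
  have h2o : PySem.Int.mod (2 * ((o : Nat) : Int)) (len : Int) = (((2*o) % len : Nat) : Int) := by
    rw [show (2 * ((o : Nat) : Int)) = (((2*o : Nat)) : Int) by push_cast; ring, PySem.Int.mod_natCast]
  simp only [zero_add, h2o, PySem.List.pyGetD_natCast, PySem.List.pySetD_natCast]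

theorem pvMulPortEq (len : Nat) (hlen : 0 < len) (sq : List Int) :
    (PySem.List.pyRange 0 (len : Int) 1).map
        (fun o => PySem.Int.bxor (PySem.List.pyGetD sq o 0)
          (PySem.List.pyGetD sq (PySem.Int.mod (o - 1) (len : Int)) 0))
      = pvMulStep len sq := by
  rw [PySem.List.pyRange_one, List.map_map]
  rw [show (((len : Nat) : Int) - 0).toNat = len by omega]
  unfold pvMulStep
  apply List.map_congr_left
  intro o ho
  have hon : o < len := List.mem_range.mp ho
  simp only [Function.comp, zero_add]
  rw [pvModSub1 len o hlen hon]
  simp only [PySem.List.pyGetD_natCast]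

theorem pvApplyPortEq (len : Nat) (hlen : 0 < len) (c row : List Int) :
    (PySem.List.pyRange 0 (len : Int) 1).map
        (fun j =>
          (PySem.List.pyRange 0 (len : Int) 1).foldl
            (fun acc o =>
              if PySem.List.pyGetD c o 0 ≠ 0 then
                PySem.Int.bxor acc (PySem.List.pyGetD row (PySem.Int.mod (j + o) (len : Int)) 0)
              else acc)
            0)
      = pvSemRow len c row := by
  rw [PySem.List.pyRange_one, List.map_map]
  rw [show (((len : Nat) : Int) - 0).toNat = len by omega]
  unfold pvSemRow
  apply List.map_congr_left
  intro j hj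
  simp only [Function.comp, zero_add]
  rw [List.foldl_map]
  have hb : ∀ (acc : Int) (o : Nat),
      (if PySem.List.pyGetD c ((o : Nat) : Int) 0 ≠ 0 then
        PySem.Int.bxor acc (PySem.List.pyGetD row (PySem.Int.mod (((j : Nat) : Int) + ((o : Nat) : Int)) (len : Int)) 0)
      else acc)
      = (if c.getD o 0 ≠ 0 then PySem.Int.bxor acc (row.getD ((j + o) % len) 0) else acc) := by
    intro acc o
    have hjo : PySem.Int.mod (((j : Nat) : Int) + ((o : Nat) : Int)) (len : Int)
        = (((j + o) % len : Nat) : Int) := by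
      rw [show (((j : Nat) : Int) + ((o : Nat) : Int)) = (((j + o : Nat)) : Int) by push_cast; ring,
          PySem.Int.mod_natCast]
    simp only [hjo, PySem.List.pyGetD_natCast]
  have hfold : (List.range len).foldl
      (fun acc (o : Nat) =>
        if PySem.List.pyGetD c ((o : Nat) : Int) 0 ≠ 0 then
          PySem.Int.bxor acc (PySem.List.pyGetD row (PySem.Int.mod (((j : Nat) : Int) + ((o : Nat) : Int)) (len : Int)) 0)
        else acc) 0
      = (List.range len).foldl
        (fun acc o => if c.getD o 0 ≠ 0 then PySem.Int.bxor acc (row.getD ((j + o) % len) 0) else acc) 0 := by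
    congr 1
    funext acc o
    exact hb acc o
  rw [hfold, pvFoldAcc (fun o => c.getD o 0 ≠ 0) (fun o => row.getD ((j + o) % len) 0), pvBx_zero_left]
  rfl

theorem pvPortB (m : Int) (row : List Int) :
    xorMatrix_alt m row
      = (pvStepT 1)^[pvBitsVal (PySem.List.slice (PySem.Int.toBinChars0b (m - 1)) (some 2) none)] row := by
  unfold xorMatrix_alt
  simp only [PySem.List.len_eq]
  by_cases hnil : row = []
  · rw [if_pos (by rw [hnil]; rfl)]
    rw [hnil]
    exact (Function.iterate_fixed (by simp [pvStepT]) _).symm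
  · have hlen : 0 < row.length := List.length_pos_iff.mpr hnil
    rw [if_neg (by exact_mod_cast (by omega : ¬ row.length = 0))]
    have hc0 : ((row.length : Int) - 1).toNat = row.length - 1 := by omega
    rw [hc0]
    have hbody : (fun (c : List Int) (bit : Char) =>
        let sq := (PySem.List.pyRange 0 (row.length : Int) 1).foldl
          (fun sq o =>
            if PySem.List.pyGetD c o 0 ≠ 0 then
              PySem.List.pySetD sq (PySem.Int.mod (2 * o) (row.length : Int))
                (PySem.Int.bxor (PySem.List.pyGetD sq (PySem.Int.mod (2 * o) (row.length : Int)) 0) 1)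
            else sq)
          (List.replicate ((row.length : Int)).toNat 0)
        let c := sq
        if bit = '1' then
          (PySem.List.pyRange 0 (row.length : Int) 1).map
            (fun o => PySem.Int.bxor (PySem.List.pyGetD c o 0)
              (PySem.List.pyGetD c (PySem.Int.mod (o - 1) (row.length : Int)) 0))
        else c) = pvBody row.length := by
      funext c bit
      show (if bit = '1' then _ else _) = pvBody row.length c bit
      rw [pvSqPortEq row.length hlen c]
      unfold pvBody
      by_cases hb : bit = '1'
      · rw [if_pos hb, if_pos hb, pvMulPortEq row.length hlen _]
      · rw [if_neg hb, if_neg hb]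
    rw [hbody]
    rw [pvApplyPortEq row.length hlen _ row]
    have hinv := pvDigitFold row.length hlen
      (PySem.List.slice (PySem.Int.toBinChars0b (m - 1)) (some 2) none)
      (1 :: List.replicate (row.length - 1) 0) 0
      (pvE0_length row.length hlen) (pvE0_bin row.length)
      (fun w hw => by rw [pvE0_semRow row.length hlen w hw]; rfl)
    exact hinv.2.2 row rfl

-- ===== VERDICT (by name: the statement is the Claim_ definition above) =====
theorem xorMatrix_spec : Claim_equal_xorMatrix := by
  intro m row _
  unfold Spec_xorMatrix
  rw [pvPortA m row, pvPortB m row]
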